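-- pv_equiv track=rewrite | github.com/ChrisChan8551/DNSA | leetCode/PY/HackerRank/scratch.py | max_unique_subarray_sum
-- ===== SOURCE A (Python) =====
-- def max_unique_subarray_sum(arr, k):
--     n = len(arr)
--     if k > n:
--         return -1
--
--     max_sum = -1
--     current_sum = 0
--     left = 0
--     unique = {}
--
--     for right in range(n):
--
--         while arr[right] in unique and unique[arr[right]] > 0:
--             unique[arr[left]] -= 1
--             current_sum -= arr[left]
--             if unique[arr[left]] == 0:
--                 del unique[arr[left]]
--             left += 1
--
--         if arr[right] not in unique:
--             unique[arr[right]] = 0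
--         unique[arr[right]] += 1
--         current_sum += arr[right]
--
--         if right - left + 1 == k:
--             max_sum = max(max_sum, current_sum)
--
--             unique[arr[left]] -= 1
--             current_sum -= arr[left]
--             if unique[arr[left]] == 0:
--                 del unique[arr[left]]
--             left += 1
--
--     return max_sum if max_sum != -1 else -1
-- ===== SOURCE B (Python) =====
-- def max_unique_subarray_sum(arr, k):
--     n = len(arr)
--     if k > n or k < 1:
--         return -1
--     max_sum = -1
--     for i in range(n - k + 1):
--         window = arr[i:i + k]
--         if len(set(window)) == k:
--             s = sum(window)
--             if s > max_sum:
--                 max_sum = s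
--     return max_sum
-- ===== Notes on version B (the rewrite author's own statement) =====
-- stated objective: simpler
-- what changed: Replaced the stateful sliding-window (two pointers plus a count dict maintained incrementally) by a plain brute-force scan that slices each size-k window, tests uniqueness with len(set(window)) and keeps a running max.
import Mathlib
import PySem

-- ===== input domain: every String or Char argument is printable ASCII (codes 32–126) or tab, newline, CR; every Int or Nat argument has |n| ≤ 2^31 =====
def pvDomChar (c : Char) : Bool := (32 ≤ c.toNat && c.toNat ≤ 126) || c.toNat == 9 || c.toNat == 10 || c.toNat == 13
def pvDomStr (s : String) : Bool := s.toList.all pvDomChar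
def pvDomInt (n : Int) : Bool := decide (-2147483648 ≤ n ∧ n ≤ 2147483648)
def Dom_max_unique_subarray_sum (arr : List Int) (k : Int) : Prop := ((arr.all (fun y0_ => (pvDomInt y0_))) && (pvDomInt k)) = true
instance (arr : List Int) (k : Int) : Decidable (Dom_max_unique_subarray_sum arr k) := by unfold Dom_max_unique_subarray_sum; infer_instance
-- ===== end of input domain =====

-- B replaces A's stateful sliding window (two pointers + a count dict) by a plain
-- brute-force scan over every size-k slice; not faster, but shorter and plainer.


-- ===== PORT A =====
-- Python's inner `while arr[right] in unique and unique[arr[right]] > 0: …` loop.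
-- It advances `left` by one per iteration, so it runs at most `right - left ≤ len(arr)`
-- times; the port gives it fuel `arr.length`, which is proved sufficient below.
-- `arr[left]` is `pyGetD arr left 0`: every index the loop reads is in range
-- (left < len(arr) whenever the loop body runs), so the default is never used;
-- `unique[arr[left]] -= 1` is `modify … 0 (· - 1)` — the key is always present there.
def msA_while (arr : List Int) (x : Int) : Nat → Int × Int × PySem.Dict Int Int → Int × Int × PySem.Dict Int Int
  | 0, st => st
  | fuel+1, (curSum, left, unique) =>
    match unique.get? x with
    | some c =>
      if c > 0 then
        let l := PySem.List.pyGetD arr left 0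
        let unique1 := unique.modify l 0 (fun v => v - 1)
        let curSum1 := curSum - l
        let unique2 := if unique1.getD l 0 = 0 then unique1.erase l else unique1
        msA_while arr x fuel (curSum1, left + 1, unique2)
      else (curSum, left, unique)
    | none => (curSum, left, unique)

-- one iteration of Python's `for right in range(n)` body; state = (max_sum, current_sum, left, unique)
def msA_step (arr : List Int) (k : Int) (st : Int × Int × Int × PySem.Dict Int Int) (right : Int) :
    Int × Int × Int × PySem.Dict Int Int :=
  let maxSum := st.1
  let x := PySem.List.pyGetD arr right 0
  let s1 := msA_while arr x arr.length (st.2.1, st.2.2.1, st.2.2.2)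
  let curSum1 := s1.1
  let left1 := s1.2.1
  let unique1 := s1.2.2
  let unique2 := if unique1.contains x then unique1 else unique1.insert x 0
  let unique3 := unique2.modify x 0 (fun v => v + 1)
  let curSum2 := curSum1 + x
  if right - left1 + 1 = k then
    let maxSum1 := max maxSum curSum2
    let l := PySem.List.pyGetD arr left1 0
    let unique4 := unique3.modify l 0 (fun v => v - 1)
    let curSum3 := curSum2 - l
    let unique5 := if unique4.getD l 0 = 0 then unique4.erase l else unique4
    (maxSum1, curSum3, left1 + 1, unique5)
  else (maxSum, curSum2, left1, unique3)

def max_unique_subarray_sum (arr : List Int) (k : Int) : Int :=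
  let n : Int := arr.length
  if k > n then -1
  else
    let st := (PySem.List.pyRange 0 n 1).foldl (msA_step arr k) (-1, 0, 0, PySem.Dict.empty)
    if st.1 ≠ -1 then st.1 else -1

-- ===== PORT B =====
def max_unique_subarray_sum_alt (arr : List Int) (k : Int) : Int :=
  let n : Int := arr.length
  if k > n ∨ k < 1 then -1
  else
    (PySem.List.pyRange 0 (n - k + 1) 1).foldl (fun maxSum i =>
      let window := PySem.List.slice arr (some i) (some (i + k))
      if ((PySem.Set.ofList window).length : Int) = k then
        let s := window.sum
        if s > maxSum then s else maxSum
      else maxSum) (-1)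

-- ===== PRECONDITION & SPEC =====
def Spec_max_unique_subarray_sum (arr : List Int) (k : Int) (out : Int) : Prop := out = max_unique_subarray_sum_alt arr k
instance (arr : List Int) (k : Int) (out : Int) : Decidable (Spec_max_unique_subarray_sum arr k out) := by unfold Spec_max_unique_subarray_sum; infer_instance

-- ===== CLAIM (what is proved, stated in full; the proofs are below) =====
def Claim_equal_max_unique_subarray_sum : Prop := ∀ (arr : List Int) (k : Int), Dom_max_unique_subarray_sum arr k → Spec_max_unique_subarray_sum arr k (max_unique_subarray_sum arr k)

-- ===== LEMMAS AND PROOFS =====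

-- the window arr[l:r]
def msWin (arr : List Int) (l r : Nat) : List Int := (arr.drop l).take (r - l)

-- `d` is the count dict of a duplicate-free window `w`
def DictIs (d : PySem.Dict Int Int) (w : List Int) : Prop :=
  ∀ v : Int, d.get? v = if v ∈ w then some 1 else none

-- B's loop body, over naturals
def bStep (arr : List Int) (kN : Nat) (acc : Int) (i : Nat) : Int :=
  let w := (arr.drop i).take kN
  if w.Nodup ∧ w.length = kN then max acc w.sum else acc

-- the running max after examining windows starting at 0 … m-1
def bestUpTo (arr : List Int) (kN m : Nat) : Int := (List.range m).foldl (bStep arr kN) (-1)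

lemma bestUpTo_succ (arr : List Int) (kN m : Nat) :
    bestUpTo arr kN (m+1) = bStep arr kN (bestUpTo arr kN m) m := by
  simp [bestUpTo, List.range_succ]

lemma find?_filter_ne (t : List (Int × Int)) (k k' : Int) (h : k' ≠ k) :
    List.find? (fun p => p.1 == k') (t.filter (fun p => !(p.1 == k))) =
      List.find? (fun p => p.1 == k') t := by
  induction t with
  | nil => rfl
  | cons p t ih =>
    by_cases hp : p.1 = k
    · rw [List.filter_cons_of_neg (by simp [hp]), List.find?_cons_of_neg (by simp [hp]; omega)]
      exact ih
    · rw [List.filter_cons_of_pos (by simp [hp])]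
      by_cases hp' : p.1 = k'
      · rw [List.find?_cons_of_pos (by simp [hp']), List.find?_cons_of_pos (by simp [hp'])]
      · rw [List.find?_cons_of_neg (by simp [hp']), List.find?_cons_of_neg (by simp [hp'])]
        exact ih

lemma get?_erase (d : PySem.Dict Int Int) (k k' : Int) :
    (d.erase k).get? k' = if k' = k then none else d.get? k' := by
  obtain ⟨items⟩ := d
  simp only [PySem.Dict.erase, PySem.Dict.get?]
  by_cases h : k' = k
  · subst h
    rw [if_pos rfl, List.find?_eq_none.mpr, Option.map_none]
    intro p hp
    have := List.of_mem_filter hp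
    simpa using this
  · rw [if_neg h, find?_filter_ne _ _ _ h]

lemma contains_false_of_get?_none (d : PySem.Dict Int Int) (k : Int)
    (h : d.get? k = none) : d.contains k = false := by
  rw [PySem.Dict.contains_eq_isSome_get? d k, h]; rfl

-- window facts
lemma msWin_length (arr : List Int) (l r : Nat) (hr : r ≤ arr.length) (hl : l ≤ r) :
    (msWin arr l r).length = r - l := by
  simp [msWin]; omega

lemma msWin_self (arr : List Int) (l : Nat) : msWin arr l l = [] := by simp [msWin]

lemma msWin_cons (arr : List Int) (l r : Nat) (hl : l < r) (hr : r ≤ arr.length) :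
    msWin arr l r = arr[l]'(by omega) :: msWin arr (l+1) r := by
  unfold msWin
  rw [List.drop_eq_getElem_cons (by omega), show r - l = (r - (l+1)) + 1 by omega,
    List.take_succ_cons]

lemma msWin_snoc (arr : List Int) (l r : Nat) (hl : l ≤ r) (hr : r < arr.length) :
    msWin arr l (r+1) = msWin arr l r ++ [arr[r]'(by omega)] := by
  unfold msWin
  rw [show r + 1 - l = (r - l) + 1 by omega, List.take_succ]
  congr 1
  rw [List.getElem?_drop]
  simp [show l + (r - l) = r by omega]

lemma msWin_prefix (arr : List Int) (l r : Nat) :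
    msWin arr l r = (msWin arr l (r+1)).take (r - l) := by
  simp [msWin, List.take_take]; omega

-- DictIs transformations
lemma DictIs_empty : DictIs PySem.Dict.empty [] := by
  intro v; simp [PySem.Dict.get?, PySem.Dict.empty]

lemma DictIs_removeHead (d : PySem.Dict Int Int) (h : Int) (t : List Int)
    (hd : DictIs d (h :: t)) (hht : h ∉ t) :
    ((d.modify h 0 (fun v => v - 1)).getD h 0 = 0) ∧
    DictIs ((d.modify h 0 (fun v => v - 1)).erase h) t := by
  have hg : d.getD h 0 = 1 := by
    rw [PySem.Dict.getD_eq_get?_getD, hd h, if_pos (List.mem_cons_self)]; rfl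
  have hmod : d.modify h 0 (fun v => v - 1) = d.insert h 0 := by
    rw [PySem.Dict.modify, hg]; norm_num
  constructor
  · rw [hmod, PySem.Dict.getD_eq_get?_getD, PySem.Dict.get?_insert_self]; rfl
  · intro v
    rw [hmod, get?_erase]
    by_cases hv : v = h
    · subst hv; simp [hht]
    · rw [if_neg hv, PySem.Dict.get?_insert_of_ne (hne := hv) .., hd v]
      simp [hv]

lemma DictIs_add (d : PySem.Dict Int Int) (w : List Int) (x : Int)
    (hd : DictIs d w) (hx : x ∉ w) :
    DictIs (((if d.contains x then d else d.insert x 0)).modify x 0 (fun v => v + 1)) (w ++ [x]) := by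
  have hnone : d.get? x = none := by rw [hd x, if_neg hx]
  rw [contains_false_of_get?_none d x hnone]
  simp only [Bool.false_eq_true, if_false]
  have hg : (d.insert x 0).getD x 0 = 0 := by
    rw [PySem.Dict.getD_eq_get?_getD, PySem.Dict.get?_insert_self]; rfl
  rw [PySem.Dict.modify, hg]
  intro v
  by_cases hv : v = x
  · subst hv; rw [PySem.Dict.get?_insert_self]; simp
  · rw [PySem.Dict.get?_insert_of_ne (hne := hv) .., PySem.Dict.get?_insert_of_ne (hne := hv) .., hd v]
    simp [hv]

lemma not_nodup_append_singleton {x : Int} {l : List Int} (h : x ∈ l) : ¬ (l ++ [x]).Nodup := by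
  intro hn
  rw [List.nodup_append] at hn
  exact hn.2.2 x h x (by simp) rfl

-- specification of the inner while loop
lemma while_spec (arr : List Int) (x : Int) (r : Nat) (hr : r ≤ arr.length) :
    ∀ fuel lN (d : PySem.Dict Int Int), lN ≤ r → r - lN ≤ fuel →
    (msWin arr lN r).Nodup → DictIs d (msWin arr lN r) →
    ∃ l'N d', msA_while arr x fuel ((msWin arr lN r).sum, (lN : Int), d)
        = ((msWin arr l'N r).sum, (l'N : Int), d') ∧
      lN ≤ l'N ∧ l'N ≤ r ∧ (msWin arr l'N r).Nodup ∧ DictIs d' (msWin arr l'N r) ∧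
      x ∉ msWin arr l'N r ∧ (∀ j, lN ≤ j → j < l'N → x ∈ msWin arr j r) := by
  intro fuel
  induction fuel with
  | zero =>
    intro lN d hl hf hnd hdict
    refine ⟨lN, d, rfl, le_refl _, hl, hnd, hdict, ?_, ?_⟩
    · have : lN = r := by omega
      subst this
      rw [msWin_self]
      simp
    · intro j h1 h2; omega
  | succ fuel ih =>
    intro lN d hl hf hnd hdict
    by_cases hmem : x ∈ msWin arr lN r
    · have hlt : lN < r := by
        rcases Nat.lt_or_ge lN r with h | h
        · exact h
        · exfalso
          have : lN = r := by omega
          subst this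
          rw [msWin_self] at hmem
          simp at hmem
      have hln : lN < arr.length := by omega
      have hcons := msWin_cons arr lN r hlt hr
      have hget : d.get? x = some 1 := by rw [hdict x, if_pos hmem]
      have hnd' : (msWin arr (lN+1) r).Nodup := by
        rw [hcons] at hnd; exact (List.nodup_cons.mp hnd).2
      have hnt : arr[lN] ∉ msWin arr (lN+1) r := by
        rw [hcons] at hnd; exact (List.nodup_cons.mp hnd).1
      obtain ⟨hz, hdict'⟩ := DictIs_removeHead d (arr[lN]) (msWin arr (lN+1) r)
        (by rw [← hcons]; exact hdict) hnt
      have hidx : PySem.List.pyGetD arr ((lN : Nat) : Int) 0 = arr[lN] := by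
        rw [PySem.List.pyGetD_natCast, List.getD_eq_getElem arr 0 hln]
      have hsum : (msWin arr lN r).sum - arr[lN] = (msWin arr (lN+1) r).sum := by
        rw [hcons, List.sum_cons]; ring
      have hstep : msA_while arr x (fuel+1) ((msWin arr lN r).sum, ((lN : Nat) : Int), d)
          = msA_while arr x fuel ((msWin arr (lN+1) r).sum, (((lN+1 : Nat)) : Int),
              ((d.modify (arr[lN]) 0 (fun v => v - 1)).erase (arr[lN]))) := by
        simp only [msA_while, hget]
        rw [if_pos (by norm_num)]
        simp only [hidx, hz, hsum]
        norm_num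
      rw [hstep]
      obtain ⟨l'N, d', heq, h1, h2, h3, h4, h5, h6⟩ :=
        ih (lN+1) _ (by omega) (by omega) hnd' hdict'
      refine ⟨l'N, d', heq, by omega, h2, h3, h4, h5, ?_⟩
      intro j hj1 hj2
      rcases Nat.eq_or_lt_of_le hj1 with he | hlt2
      · rw [← he]; exact hmem
      · exact h6 j hlt2 hj2
    · have hget : d.get? x = none := by rw [hdict x, if_neg hmem]
      refine ⟨lN, d, ?_, le_refl _, hl, hnd, hdict, hmem, by intro j h1 h2; omega⟩
      simp only [msA_while, hget]

-- the invariant carried through A's main loop (case 1 ≤ k ≤ n)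
def msInv (arr : List Int) (kN r : Nat) (st : Int × Int × Int × PySem.Dict Int Int) : Prop :=
  ∃ lN : Nat, st.2.2.1 = (lN : Int) ∧ lN ≤ r ∧
    (msWin arr lN r).Nodup ∧ st.2.1 = (msWin arr lN r).sum ∧ DictIs st.2.2.2 (msWin arr lN r) ∧
    r - lN ≤ kN - 1 ∧
    (∀ j : Nat, j < lN → ¬ ((msWin arr j r).Nodup ∧ r - j ≤ kN - 1)) ∧
    st.1 = bestUpTo arr kN (r + 1 - kN)

lemma msInv_step (arr : List Int) (kN r : Nat) (hk : 1 ≤ kN) (hkn : kN ≤ arr.length)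
    (hr : r < arr.length) (st : Int × Int × Int × PySem.Dict Int Int)
    (hInv : msInv arr kN r st) :
    msInv arr kN (r+1) (msA_step arr (kN : Int) st (r : Int)) := by
  obtain ⟨ms, cs, l, d⟩ := st
  obtain ⟨lN, hleft, hl, hnd, hsum, hdict, hsize, hmin, hms⟩ := hInv
  simp only at hleft hsum hdict hms
  subst hleft hsum
  have hxval : PySem.List.pyGetD arr ((r : Nat) : Int) 0 = arr[r] := by
    rw [PySem.List.pyGetD_natCast, List.getD_eq_getElem arr 0 hr]
  obtain ⟨l', d', heq, hge, hle, hnd', hdict', hxnot, hxin⟩ :=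
    while_spec arr (arr[r]) r (le_of_lt hr) arr.length lN d hl (by omega) hnd hdict
  have hl'len : l' < arr.length := by omega
  have hsnoc : msWin arr l' (r+1) = msWin arr l' r ++ [arr[r]] :=
    msWin_snoc arr l' r hle hr
  have hnd'' : (msWin arr l' (r+1)).Nodup := by
    rw [hsnoc]
    rw [List.nodup_append]
    refine ⟨hnd', by simp, ?_⟩
    intro a ha b hb
    simp only [List.mem_singleton] at hb
    subst hb
    intro hab
    exact hxnot (hab ▸ ha)
  have hdict'' : DictIs (((if d'.contains arr[r] then d' else d'.insert arr[r] 0)).modify arr[r] 0 (fun v => v + 1))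
      (msWin arr l' (r+1)) := by
    rw [hsnoc]; exact DictIs_add d' _ _ hdict' hxnot
  have hsum'' : (msWin arr l' r).sum + arr[r] = (msWin arr l' (r+1)).sum := by
    rw [hsnoc, List.sum_append]; simp
  have hwlen : (msWin arr l' (r+1)).length = r + 1 - l' :=
    msWin_length arr l' (r+1) (by omega) (by omega)
  -- unfold one iteration
  simp only [msA_step, hxval, heq]
  by_cases hbr : ((r : Nat) : Int) - ((l' : Nat) : Int) + 1 = ((kN : Nat) : Int)
  · -- the window has size exactly k: record and shift left
    rw [if_pos hbr]
    have hlk : l' + kN = r + 1 := by omega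
    have hcons : msWin arr l' (r+1) = arr[l'] :: msWin arr (l'+1) (r+1) :=
      msWin_cons arr l' (r+1) (by omega) (by omega)
    have hhead : arr[l'] ∉ msWin arr (l'+1) (r+1) := by
      rw [hcons] at hnd''; exact (List.nodup_cons.mp hnd'').1
    obtain ⟨hz, hdrem⟩ := DictIs_removeHead _ (arr[l']) (msWin arr (l'+1) (r+1))
      (by rw [← hcons]; exact hdict'') hhead
    have hlval : PySem.List.pyGetD arr ((l' : Nat) : Int) 0 = arr[l'] := by
      rw [PySem.List.pyGetD_natCast, List.getD_eq_getElem arr 0 hl'len]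
    have htsum : (msWin arr l' r).sum + arr[r] - arr[l'] = (msWin arr (l'+1) (r+1)).sum := by
      have := hsum''
      rw [hcons, List.sum_cons] at this
      omega
    refine ⟨l'+1, ?_, by omega, ?_, ?_, ?_, by omega, ?_, ?_⟩
    · simp only [hlval, hz, if_pos rfl]
      push_cast
      ring
    · rw [hcons] at hnd''; exact (List.nodup_cons.mp hnd'').2
    · simp only [hlval, hz, if_pos rfl]
      exact htsum
    · simp only [hlval, hz, if_pos rfl]
      exact hdrem
    · intro j hj
      rintro ⟨-, hsz⟩
      omega
    · simp only [hlval, hz, if_pos rfl]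
      have hidx : r + 1 + 1 - kN = (r + 1 - kN) + 1 := by omega
      have hil : r + 1 - kN = l' := by omega
      rw [hidx, bestUpTo_succ, hil]
      unfold bStep
      have hwin : (arr.drop l').take kN = msWin arr l' (r+1) := by
        unfold msWin
        congr 1
        omega
      rw [hwin, if_pos ⟨hnd'', by omega⟩, hms, hil]
      omega
  · -- window smaller than k: keep scanning
    rw [if_neg hbr]
    have hne : l' + kN ≠ r + 1 := by
      intro hcontra
      exact hbr (by omega)
    have hsz'' : r + 1 - l' ≤ kN - 1 := by omega
    refine ⟨l', rfl, by omega, hnd'', hsum'', hdict'', hsz'', ?_, ?_⟩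
    · intro j hj
      rintro ⟨hnodj, hszj⟩
      rcases Nat.lt_or_ge j lN with hcase | hcase
      · refine hmin j hcase ⟨?_, by omega⟩
        have : msWin arr j r = (msWin arr j (r+1)).take (r - j) := msWin_prefix arr j r
        rw [this]
        exact hnodj.sublist (List.take_sublist _ _)
      · have hx : arr[r] ∈ msWin arr j r := hxin j hcase hj
        have : msWin arr j (r+1) = msWin arr j r ++ [arr[r]] :=
          msWin_snoc arr j r (by omega) hr
        rw [this] at hnodj
        exact not_nodup_append_singleton hx hnodj
    · rcases Nat.lt_or_ge (r+1) kN with hcase | hcase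
      · have h0 : r + 1 - kN = r + 1 + 1 - kN := by omega
        rw [hms, h0]
      · have hidx : r + 1 + 1 - kN = (r + 1 - kN) + 1 := by omega
        set i := r + 1 - kN with hi
        have hik : i + kN = r + 1 := by omega
        have hwini : (arr.drop i).take kN = msWin arr i (r+1) := by
          unfold msWin; congr 1; omega
        have hcond : ¬ ((msWin arr i (r+1)).Nodup ∧ (msWin arr i (r+1)).length = kN) := by
          rintro ⟨hnodi, hleni⟩
          rcases Nat.lt_or_ge i lN with hcase2 | hcase2
          · refine hmin i hcase2 ⟨?_, by omega⟩
            rw [msWin_prefix arr i r]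
            exact hnodi.sublist (List.take_sublist _ _)
          · have hil' : i < l' := by omega
            have hx : arr[r] ∈ msWin arr i r := hxin i hcase2 hil'
            have hsn : msWin arr i (r+1) = msWin arr i r ++ [arr[r]] :=
              msWin_snoc arr i r (by omega) hr
            rw [hsn] at hnodi
            exact not_nodup_append_singleton hx hnodi
        rw [hms, hidx, bestUpTo_succ]
        unfold bStep
        rw [hwini, if_neg hcond]

lemma msInv_main (arr : List Int) (kN : Nat) (hk : 1 ≤ kN) (hkn : kN ≤ arr.length) :
    ∀ m, m ≤ arr.length →
    msInv arr kN m (((List.range m).map (fun (j : Nat) => (j : Int))).foldl (msA_step arr (kN : Int)) (-1, 0, 0, PySem.Dict.empty)) := by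
  intro m
  induction m with
  | zero =>
    intro _
    refine ⟨0, rfl, le_refl _, by rw [msWin_self]; exact List.nodup_nil,
      by rw [msWin_self]; rfl, by rw [msWin_self]; exact DictIs_empty, by omega,
      by intro j hj; omega, ?_⟩
    have h0 : 0 + 1 - kN = 0 := by omega
    rw [h0]
    rfl
  | succ m ih =>
    intro hm
    rw [List.range_succ, List.map_append, List.foldl_append]
    simp only [List.map_cons, List.map_nil, List.foldl_cons, List.foldl_nil]
    exact msInv_step arr kN m hk hkn (by omega) _ (ih (by omega))

-- the k ≤ 0 case: the recording branch never fires, max_sum stays -1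
def msInvW (arr : List Int) (r : Nat) (st : Int × Int × Int × PySem.Dict Int Int) : Prop :=
  ∃ lN : Nat, st.2.2.1 = (lN : Int) ∧ lN ≤ r ∧
    (msWin arr lN r).Nodup ∧ st.2.1 = (msWin arr lN r).sum ∧ DictIs st.2.2.2 (msWin arr lN r) ∧
    st.1 = -1

lemma msInvW_main (arr : List Int) (k : Int) (hk : k < 1) :
    ∀ m, m ≤ arr.length →
    msInvW arr m (((List.range m).map (fun (j : Nat) => (j : Int))).foldl (msA_step arr k) (-1, 0, 0, PySem.Dict.empty)) := by
  intro m
  induction m with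
  | zero =>
    intro _
    exact ⟨0, rfl, le_refl _, by rw [msWin_self]; exact List.nodup_nil,
      by rw [msWin_self]; rfl, by rw [msWin_self]; exact DictIs_empty, rfl⟩
  | succ m ih =>
    intro hm
    rw [List.range_succ, List.map_append, List.foldl_append]
    simp only [List.map_cons, List.map_nil, List.foldl_cons, List.foldl_nil]
    have h := ih (by omega)
    set st := ((List.range m).map (fun (j : Nat) => (j : Int))).foldl (msA_step arr k) (-1, 0, 0, PySem.Dict.empty) with hst
    obtain ⟨ms, cs, l, d⟩ := st
    obtain ⟨lN, hleft, hl, hnd, hsum, hdict, hms⟩ := h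
    simp only at hleft hsum hdict hms
    subst hleft hsum
    have hr : m < arr.length := by omega
    have hxval : PySem.List.pyGetD arr ((m : Nat) : Int) 0 = arr[m] := by
      rw [PySem.List.pyGetD_natCast, List.getD_eq_getElem arr 0 hr]
    obtain ⟨l', d', heq, hge, hle, hnd', hdict', hxnot, hxin⟩ :=
      while_spec arr (arr[m]) m (le_of_lt hr) arr.length lN d hl (by omega) hnd hdict
    have hsnoc : msWin arr l' (m+1) = msWin arr l' m ++ [arr[m]] :=
      msWin_snoc arr l' m hle hr
    have hnd'' : (msWin arr l' (m+1)).Nodup := by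
      rw [hsnoc, List.nodup_append]
      refine ⟨hnd', by simp, ?_⟩
      intro a ha b hb
      simp only [List.mem_singleton] at hb
      subst hb
      intro hab
      exact hxnot (hab ▸ ha)
    have hdict'' : DictIs (((if d'.contains arr[m] then d' else d'.insert arr[m] 0)).modify arr[m] 0 (fun v => v + 1))
        (msWin arr l' (m+1)) := by
      rw [hsnoc]; exact DictIs_add d' _ _ hdict' hxnot
    have hsum'' : (msWin arr l' m).sum + arr[m] = (msWin arr l' (m+1)).sum := by
      rw [hsnoc, List.sum_append]; simp
    simp only [msA_step, hxval, heq]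
    rw [if_neg (by omega)]
    exact ⟨l', rfl, by omega, hnd'', hsum'', hdict'', hms⟩

lemma ofList_length_eq_iff (w : List Int) :
    (PySem.Set.ofList w).length = w.length ↔ w.Nodup := by
  have h1 : List.Nodup (PySem.Set.ofList w) := PySem.Set.nodup_ofList w
  have h2 : List.toFinset (PySem.Set.ofList w) = w.toFinset := by
    ext a; simp [PySem.Set.mem_ofList]
  constructor
  · intro h
    have hperm : List.Perm (PySem.Set.ofList w) w.dedup :=
      List.perm_of_nodup_nodup_toFinset_eq h1 (List.nodup_dedup w) (by rw [h2]; ext a; simp)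
    have hlen : w.dedup.length = w.length := by rw [← hperm.length_eq, h]
    have := (List.dedup_sublist w).eq_of_length hlen
    rw [← this]; exact List.nodup_dedup w
  · intro h
    have hperm : List.Perm (PySem.Set.ofList w) w :=
      List.perm_of_nodup_nodup_toFinset_eq h1 h h2
    exact hperm.length_eq

lemma pyRange_zero_eq_map (n : Nat) :
    PySem.List.pyRange 0 (n : Int) 1 = (List.range n).map (fun (j : Nat) => (j : Int)) := by
  rw [PySem.List.pyRange_one]
  simp only [Int.sub_zero, Int.toNat_natCast]
  exact List.map_congr_left (fun a _ => by omega)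

lemma alt_eq_bestUpTo (arr : List Int) (k : Int) (hk : 1 ≤ k) (hkn : k ≤ (arr.length : Int)) :
    max_unique_subarray_sum_alt arr k = bestUpTo arr k.toNat (arr.length + 1 - k.toNat) := by
  have hkN : ((k.toNat : Nat) : Int) = k := Int.toNat_of_nonneg (by omega)
  unfold max_unique_subarray_sum_alt
  rw [if_neg (by omega)]
  have hM : (arr.length : Int) - k + 1 = ((arr.length + 1 - k.toNat : Nat) : Int) := by omega
  rw [hM, pyRange_zero_eq_map, List.foldl_map]
  apply PySem.List.foldl_congr_mem
  intro acc j hj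
  have hjM : j < arr.length + 1 - k.toNat := List.mem_range.mp hj
  have hjk : j + k.toNat ≤ arr.length := by omega
  have hslice : PySem.List.slice arr (some ((j : Nat) : Int)) (some (((j : Nat) : Int) + k))
      = (arr.drop j).take k.toNat := by
    rw [← hkN, PySem.List.slice_natCast_add]
    rw [Int.toNat_natCast]
  have hlen : ((arr.drop j).take k.toNat).length = k.toNat := by
    simp
    omega
  simp only [hslice]
  unfold bStep
  have hiff : (((PySem.Set.ofList ((arr.drop j).take k.toNat)).length : Int) = k) ↔
      (((arr.drop j).take k.toNat).Nodup ∧ ((arr.drop j).take k.toNat).length = k.toNat) := by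
    constructor
    · intro h
      refine ⟨(ofList_length_eq_iff _).mp ?_, hlen⟩
      rw [hlen]
      omega
    · rintro ⟨hnd, -⟩
      have h2 := (ofList_length_eq_iff _).mpr hnd
      rw [hlen] at h2
      omega
  by_cases hc : ((arr.drop j).take k.toNat).Nodup ∧ ((arr.drop j).take k.toNat).length = k.toNat
  · rw [if_pos (hiff.mpr hc), if_pos hc]
    by_cases hgt : ((arr.drop j).take k.toNat).sum > acc
    · rw [if_pos hgt, max_eq_right (by omega)]
    · rw [if_neg hgt, max_eq_left (by omega)]
  · rw [if_neg (fun h => hc (hiff.mp h)), if_neg hc]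

lemma main_eq (arr : List Int) (k : Int) :
    max_unique_subarray_sum arr k = max_unique_subarray_sum_alt arr k := by
  by_cases hk1 : k > (arr.length : Int)
  · unfold max_unique_subarray_sum max_unique_subarray_sum_alt
    rw [if_pos hk1, if_pos (Or.inl hk1)]
  · by_cases hk2 : k < 1
    · unfold max_unique_subarray_sum
      rw [if_neg hk1]
      obtain ⟨lN, -, -, -, -, -, hms⟩ := msInvW_main arr k hk2 arr.length (le_refl _)
      simp only [pyRange_zero_eq_map, hms]
      unfold max_unique_subarray_sum_alt
      rw [if_pos (Or.inr hk2)]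
      simp
    · have hkN : ((k.toNat : Nat) : Int) = k := Int.toNat_of_nonneg (by omega)
      unfold max_unique_subarray_sum
      rw [if_neg hk1]
      have h := msInv_main arr k.toNat (by omega) (by omega) arr.length (le_refl _)
      rw [hkN] at h
      obtain ⟨lN, -, -, -, -, -, -, -, hms⟩ := h
      simp only [pyRange_zero_eq_map, hms]
      rw [alt_eq_bestUpTo arr k (by omega) (by omega)]
      by_cases hbm : bestUpTo arr k.toNat (arr.length + 1 - k.toNat) = -1
      · rw [hbm]; simp
      · simp [hbm]

-- ===== VERDICT (by name: the statement is the Claim_ definition above) =====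
theorem max_unique_subarray_sum_spec : Claim_equal_max_unique_subarray_sum := by
  intro arr k _
  unfold Spec_max_unique_subarray_sum
  exact main_eq arr k
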